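-- pv_equiv track=rewrite | github.com/lqh52/PromViL | eval_scripts/evaluate_vqa.py | find_max_level_phrase_contain
-- ===== SOURCE A (Python) =====
-- def find_max_level_phrase_contain(lv1_phrase, extracted_phrase):
--     max_level = len(list(extracted_phrase.keys()))
--     max_level_phrase = (1, lv1_phrase)
--     for level in range(2,max_level+1):
--         for phrase in extracted_phrase[f'level {level}'].keys():
--             if lv1_phrase in phrase:
--                 max_level_phrase = (level, phrase)
--     return max_level_phrase
-- ===== SOURCE B (Python) =====
-- def find_max_level_phrase_contain(lv1_phrase, extracted_phrase):
--     max_level = len(extracted_phrase)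
--     for level in range(max_level, 1, -1):
--         matches = [p for p in extracted_phrase[f'level {level}'].keys() if lv1_phrase in p]
--         if matches:
--             return (level, matches[-1])
--     return (1, lv1_phrase)
-- ===== Notes on version B (the rewrite author's own statement) =====
-- stated objective: alternative
-- what changed: Replaces A's exhaustive ascending loop that keeps overwriting the result on every match with a descending highest-level-first search that collects the level's matches and returns (level, last match) at the first level containing one, short-circuiting the remaining levels.
import Mathlib
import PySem

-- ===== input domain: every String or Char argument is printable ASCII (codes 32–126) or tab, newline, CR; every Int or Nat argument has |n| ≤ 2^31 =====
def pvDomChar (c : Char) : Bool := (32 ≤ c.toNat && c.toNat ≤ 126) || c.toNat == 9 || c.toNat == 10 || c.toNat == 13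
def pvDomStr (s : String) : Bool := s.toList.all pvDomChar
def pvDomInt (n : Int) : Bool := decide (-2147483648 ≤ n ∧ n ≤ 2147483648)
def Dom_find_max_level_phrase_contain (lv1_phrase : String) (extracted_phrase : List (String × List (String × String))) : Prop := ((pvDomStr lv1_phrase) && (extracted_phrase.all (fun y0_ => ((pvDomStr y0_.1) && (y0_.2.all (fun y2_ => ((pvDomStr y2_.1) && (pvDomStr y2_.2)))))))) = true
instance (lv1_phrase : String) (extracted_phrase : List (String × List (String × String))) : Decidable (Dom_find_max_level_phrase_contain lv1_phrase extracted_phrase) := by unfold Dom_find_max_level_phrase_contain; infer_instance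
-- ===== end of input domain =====

-- B replaces A's exhaustive ascending overwrite loop with a highest-level-first search
-- that short-circuits at the first level containing a match (objective: alternative decomposition).

-- f'level {level}'
def pvLevelKey (level : Int) : String := PySem.Str.join "" ["level ", PySem.Int.toStr level]

-- ===== PORT A =====
def find_max_level_phrase_contain (lv1_phrase : String) (extracted_phrase : List (String × List (String × String))) : Int × String :=
  let d := PySem.Dict.ofList extracted_phrase
  let max_level : Int := (PySem.Dict.keys d).length
  (PySem.List.pyRange 2 (max_level + 1) 1).foldl
    (fun acc level =>
      ((PySem.Dict.ofList (PySem.Dict.getD d (pvLevelKey level) [])).keys).foldl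
        (fun acc2 phrase => if PySem.Str.isIn lv1_phrase phrase then (level, phrase) else acc2)
        acc)
    (1, lv1_phrase)

-- ===== PORT B =====
-- descending scan: fuel = current level; levels max_level, max_level-1, …, 2, then (1, lv1)
def pvAltLoop (lv1_phrase : String) (d : PySem.Dict String (List (String × String))) : Nat → Int × String
  | 0 => (1, lv1_phrase)
  | 1 => (1, lv1_phrase)
  | (n+2) =>
    match (((PySem.Dict.ofList (PySem.Dict.getD d (pvLevelKey ((n : Int) + 2)) [])).keys).filter
            (fun p => PySem.Str.isIn lv1_phrase p)).getLast? with
    | some p => ((n : Int) + 2, p)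
    | none => pvAltLoop lv1_phrase d (n+1)

def find_max_level_phrase_contain_alt (lv1_phrase : String) (extracted_phrase : List (String × List (String × String))) : Int × String :=
  let d := PySem.Dict.ofList extracted_phrase
  pvAltLoop lv1_phrase d (PySem.Dict.keys d).length

-- ===== PRECONDITION & SPEC =====
-- Pre_ excludes exactly the inputs where Python A raises KeyError: some key 'level k',
-- 2 ≤ k ≤ number of dict entries, is absent from the dict.
def Pre_find_max_level_phrase_contain (lv1_phrase : String) (extracted_phrase : List (String × List (String × String))) : Prop :=
  ∀ level ∈ PySem.List.pyRange 2 ((((PySem.Dict.ofList extracted_phrase).keys).length : Int) + 1) 1,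
    (PySem.Dict.ofList extracted_phrase).contains (pvLevelKey level) = true
instance (lv1_phrase : String) (extracted_phrase : List (String × List (String × String))) : Decidable (Pre_find_max_level_phrase_contain lv1_phrase extracted_phrase) := by unfold Pre_find_max_level_phrase_contain; infer_instance

def pvWitness_find_max_level_phrase_contain : String × (List (String × List (String × String))) :=
  ("a b", [("level 1", [("a b", "x")]), ("level 2", [("c", "y"), ("a a b c", "z")])])

def Spec_find_max_level_phrase_contain (lv1_phrase : String) (extracted_phrase : List (String × List (String × String))) (out : Int × String) : Prop := out = find_max_level_phrase_contain_alt lv1_phrase extracted_phrase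
instance (lv1_phrase : String) (extracted_phrase : List (String × List (String × String))) (out : Int × String) : Decidable (Spec_find_max_level_phrase_contain lv1_phrase extracted_phrase out) := by unfold Spec_find_max_level_phrase_contain; infer_instance

-- ===== CLAIM (what is proved, stated in full; the proofs are below) =====
def Claim_equal_find_max_level_phrase_contain : Prop := ∀ (lv1_phrase : String) (extracted_phrase : List (String × List (String × String))), Dom_find_max_level_phrase_contain lv1_phrase extracted_phrase → Pre_find_max_level_phrase_contain lv1_phrase extracted_phrase → Spec_find_max_level_phrase_contain lv1_phrase extracted_phrase (find_max_level_phrase_contain lv1_phrase extracted_phrase)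

-- ===== LEMMAS AND PROOFS =====

-- the last-match characterisation of a "keep overwriting on match" fold
theorem pv_last_fold (lvl : Int) (ls : List String) (acc : Int × String) :
    ls.foldl (fun (_ : Int × String) p => (lvl, p)) acc
      = match ls.getLast? with
        | some p => (lvl, p)
        | none => acc := by
  induction ls generalizing acc with
  | nil => rfl
  | cons x xs ih =>
    simp only [List.foldl_cons, ih]
    cases h : xs.getLast? with
    | some p => simp [List.getLast?_cons, h]
    | none =>
      have : xs = [] := List.getLast?_eq_none_iff.mp h
      subst this; rfl

theorem pv_main (lv1_phrase : String) (d : PySem.Dict String (List (String × String))) (n : Nat) :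
    (PySem.List.pyRange 2 ((n : Int) + 1) 1).foldl
      (fun acc level =>
        ((PySem.Dict.ofList (PySem.Dict.getD d (pvLevelKey level) [])).keys).foldl
          (fun acc2 phrase => if PySem.Str.isIn lv1_phrase phrase then (level, phrase) else acc2)
          acc)
      (1, lv1_phrase)
      = pvAltLoop lv1_phrase d n := by
  induction n with
  | zero =>
    rw [PySem.List.pyRange_one_eq_nil (by norm_num)]
    rfl
  | succ m ih =>
    match m, ih with
    | 0, _ =>
      rw [PySem.List.pyRange_one_eq_nil (by norm_num)]
      rfl
    | (k+1), ih =>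
      have h2 : (2 : Int) ≤ ((k : Int) + 1) + 1 := by omega
      have hsplit : PySem.List.pyRange 2 (((k+1+1 : Nat) : Int) + 1) 1
          = PySem.List.pyRange 2 (((k+1 : Nat) : Int) + 1) 1 ++ [((k+1+1 : Nat) : Int)] := by
        push_cast
        rw [show ((k : Int) + 1 + 1 + 1) = (((k : Int) + 1 + 1) + 1) from rfl,
            PySem.List.pyRange_one_succ_right (by omega)]
      rw [hsplit, List.foldl_append, ih]
      simp only [List.foldl_cons, List.foldl_nil]
      rw [PySem.List.foldl_if_eq_foldl_filter, pv_last_fold]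
      have hc : ((k+1+1 : Nat) : Int) = (k : Int) + 2 := by omega
      rw [hc, show k+1+1 = k+2 from rfl, pvAltLoop]

-- ===== VERDICT (by name: the statement is the Claim_ definition above) =====
theorem find_max_level_phrase_contain_spec : Claim_equal_find_max_level_phrase_contain := by
  intro lv1_phrase extracted_phrase _ _
  show find_max_level_phrase_contain lv1_phrase extracted_phrase
      = find_max_level_phrase_contain_alt lv1_phrase extracted_phrase
  unfold find_max_level_phrase_contain find_max_level_phrase_contain_alt
  exact pv_main lv1_phrase (PySem.Dict.ofList extracted_phrase) _
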